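-- pv_equiv track=rewrite | github.com/SUSYUSTC/MathTranslate | mathtranslate/translate.py | split_translation_by_record
-- ===== SOURCE A (Python) =====
-- def split_translation_by_record(text, standard):
--     words = set(list(standard))
--     lines = [[]]
--     for line in text.split('\n'):
--         this_words = set(list(line))
--         if (len(line) < len(words) * 1.5) and (len(line) > len(words) * 0.5) and (len(this_words.intersection(words)) >= len(this_words) * 0.8):
--             lines.append([])
--         else:
--             lines[-1].append(line.strip())
--     for i in range(len(lines)):
--         lines[i] = '\n'.join(lines[i])
--     return lines
-- ===== SOURCE B (Python) =====
-- def split_translation_by_record(text, standard):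
--     words = set(standard)
--     w = len(words)
--
--     def is_marker(line):
--         chars = set(line)
--         return (len(line) < w * 1.5 and len(line) > w * 0.5
--                 and len(chars & words) >= len(chars) * 0.8)
--
--     # traverse the lines back-to-front, flushing one joined record per marker
--     records = []
--     cur = []
--     for line in reversed(text.split('\n')):
--         if is_marker(line):
--             cur.reverse()
--             records.append('\n'.join(cur))
--             cur = []
--         else:
--             cur.append(line.strip())
--     cur.reverse()
--     records.append('\n'.join(cur))
--     records.reverse()
--     return records
-- ===== Notes on version B (the rewrite author's own statement) =====
-- stated objective: alternative
-- what changed: A grows a nested list by appending each stripped line to its last record and then joins every record in a second pass; B traverses the lines back-to-front in a single pass, flushing one joined record per marker line and reversing the result, so the output is built back-to-front with a flat (records, current) accumulator instead of A's mutated nested list plus join pass.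
import Mathlib
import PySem

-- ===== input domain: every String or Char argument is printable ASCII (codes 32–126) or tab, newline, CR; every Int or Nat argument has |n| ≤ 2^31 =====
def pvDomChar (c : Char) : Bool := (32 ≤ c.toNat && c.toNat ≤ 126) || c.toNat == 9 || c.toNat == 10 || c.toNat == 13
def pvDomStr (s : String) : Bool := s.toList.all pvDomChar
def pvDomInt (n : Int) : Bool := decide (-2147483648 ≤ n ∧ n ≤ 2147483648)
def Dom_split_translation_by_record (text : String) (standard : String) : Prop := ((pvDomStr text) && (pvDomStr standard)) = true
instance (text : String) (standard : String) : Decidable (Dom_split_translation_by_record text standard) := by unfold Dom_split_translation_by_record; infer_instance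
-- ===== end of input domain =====

-- B replaces A's append-to-last-nested-list pass plus join pass by a single reversed
-- traversal that flushes one joined record per marker line (building the output
-- back-to-front); same cost, different decomposition.
-- Float comparisons len(line) < w*1.5, len(line) > w*0.5, inter >= t*0.8 are ported as
-- the exact integer comparisons 2*len < 3*w, 2*len > w, 4*t ≤ 5*inter: exact on the
-- ASCII domain, where the distinct-character counts w and t are at most 99 (CPython's
-- int-vs-float comparisons check out against these for all t ≤ 300 and all w).

-- ===== PORT A =====
-- A's loop body (lines[-1].append is ported as dropLast ++ [last ++ [·]])
def pvStepA (words : PySem.Set Char) (lines : List (List (List Char))) (line : List Char) : List (List (List Char)) :=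
  let this_words : PySem.Set Char := PySem.Set.ofList line
  if 2 * line.length < 3 * words.length ∧ words.length < 2 * line.length ∧
      4 * this_words.length ≤ 5 * (PySem.Set.inter this_words words).length then
    lines ++ [[]]
  else
    lines.dropLast ++ [lines.getLast?.getD [] ++ [PySem.Chars.strip line]]

def split_translation_by_record (text : String) (standard : String) : List String :=
  let words : PySem.Set Char := PySem.Set.ofList standard.toList
  let lines := (PySem.Chars.splitOn text.toList ['\n']).foldl (pvStepA words) [[]]
  lines.map (fun r => String.ofList (PySem.Chars.join ['\n'] r))

-- ===== PORT B =====
def pvIsMarker (w : Nat) (words : PySem.Set Char) (line : List Char) : Bool :=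
  let chars : PySem.Set Char := PySem.Set.ofList line
  decide (2 * line.length < 3 * w ∧ w < 2 * line.length ∧
    4 * chars.length ≤ 5 * (PySem.Set.inter chars words).length)

-- B's loop body: state = (flushed records, current record collected right-to-left)
def pvStepB (w : Nat) (words : PySem.Set Char) (st : List String × List (List Char)) (line : List Char) : List String × List (List Char) :=
  if pvIsMarker w words line then
    (st.1 ++ [String.ofList (PySem.Chars.join ['\n'] st.2.reverse)], [])
  else
    (st.1, st.2 ++ [PySem.Chars.strip line])

def split_translation_by_record_alt (text : String) (standard : String) : List String :=
  let words : PySem.Set Char := PySem.Set.ofList standard.toList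
  let w := words.length
  let res := (PySem.Chars.splitOn text.toList ['\n']).reverse.foldl (pvStepB w words) ([], [])
  (res.1 ++ [String.ofList (PySem.Chars.join ['\n'] res.2.reverse)]).reverse

-- ===== PRECONDITION & SPEC =====
def Spec_split_translation_by_record (text : String) (standard : String) (out : List String) : Prop := out = split_translation_by_record_alt text standard
instance (text : String) (standard : String) (out : List String) : Decidable (Spec_split_translation_by_record text standard out) := by unfold Spec_split_translation_by_record; infer_instance

-- ===== CLAIM (what is proved, stated in full; the proofs are below) =====
def Claim_equal_split_translation_by_record : Prop := ∀ (text : String) (standard : String), Dom_split_translation_by_record text standard → Spec_split_translation_by_record text standard (split_translation_by_record text standard)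

-- ===== LEMMAS AND PROOFS =====

-- reference recursion both ports are reduced to: the list of records (as line lists)
def pvRecSplit (words : PySem.Set Char) : List (List Char) → List (List (List Char))
  | [] => [[]]
  | l :: ls =>
      let r := pvRecSplit words ls
      if pvIsMarker words.length words l then [] :: r
      else (PySem.Chars.strip l :: r.headD []) :: r.tail

theorem pvRecSplit_ne_nil (words : PySem.Set Char) (ls : List (List Char)) :
    pvRecSplit words ls ≠ [] := by
  cases ls with
  | nil => simp [pvRecSplit]
  | cons l ls => simp only [pvRecSplit]; split <;> simp

theorem pvStepA_marker (words : PySem.Set Char) (lines : List (List (List Char))) (line : List Char)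
    (h : pvIsMarker words.length words line = true) :
    pvStepA words lines line = lines ++ [[]] := by
  simp only [pvIsMarker, decide_eq_true_eq] at h
  simp only [pvStepA, if_pos h]

theorem pvStepA_nonmarker (words : PySem.Set Char) (lines : List (List (List Char))) (line : List Char)
    (h : pvIsMarker words.length words line = false) :
    pvStepA words lines line = lines.dropLast ++ [lines.getLast?.getD [] ++ [PySem.Chars.strip line]] := by
  simp only [pvIsMarker, decide_eq_false_iff_not] at h
  simp only [pvStepA, if_neg h]

-- A's foldl, started on any list with last record cur, computes pvRecSplit
theorem pvFoldA (words : PySem.Set Char) (ls : List (List Char)) :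
    ∀ (pre : List (List (List Char))) (cur : List (List Char)),
      ls.foldl (pvStepA words) (pre ++ [cur]) =
        pre ++ ((cur ++ (pvRecSplit words ls).headD []) :: (pvRecSplit words ls).tail) := by
  induction ls with
  | nil => intro pre cur; simp [pvRecSplit]
  | cons l ls ih =>
    intro pre cur
    obtain ⟨r0, rs, hr⟩ : ∃ r0 rs, pvRecSplit words ls = r0 :: rs := by
      cases h : pvRecSplit words ls with
      | nil => exact absurd h (pvRecSplit_ne_nil words ls)
      | cons a b => exact ⟨a, b, rfl⟩
    by_cases hm : pvIsMarker words.length words l = true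
    · rw [List.foldl_cons, pvStepA_marker words _ _ hm]
      have := ih (pre ++ [cur]) []
      rw [List.append_assoc] at this
      rw [show pre ++ [cur] ++ [([] : List (List Char))] = pre ++ ([cur] ++ [[]]) from List.append_assoc pre [cur] [[]], this]
      simp [pvRecSplit, hm, hr]
    · rw [List.foldl_cons,
        pvStepA_nonmarker words _ _ (Bool.not_eq_true _ ▸ hm : pvIsMarker words.length words l = false)]
      rw [List.dropLast_concat, List.getLast?_concat]
      have := ih pre (cur ++ [PySem.Chars.strip l])
      simp only [Option.getD_some] at this ⊢
      rw [this]
      simp [pvRecSplit, Bool.not_eq_true _ ▸ hm, hr]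

-- B's reversed foldl: flushed records are the tail of pvRecSplit, reversed and joined;
-- the pending record is the head of pvRecSplit, reversed
theorem pvFoldB (words : PySem.Set Char) (ls : List (List Char)) :
    ls.reverse.foldl (pvStepB words.length words) ([], []) =
      (((pvRecSplit words ls).tail.map (fun r => String.ofList (PySem.Chars.join ['\n'] r))).reverse,
        ((pvRecSplit words ls).headD []).reverse) := by
  induction ls with
  | nil => simp [pvRecSplit]
  | cons l ls ih =>
    obtain ⟨r0, rs, hr⟩ : ∃ r0 rs, pvRecSplit words ls = r0 :: rs := by
      cases h : pvRecSplit words ls with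
      | nil => exact absurd h (pvRecSplit_ne_nil words ls)
      | cons a b => exact ⟨a, b, rfl⟩
    rw [List.reverse_cons, List.foldl_append, ih, List.foldl_cons, List.foldl_nil]
    by_cases hm : pvIsMarker words.length words l = true
    · simp [pvStepB, hm, pvRecSplit, hr]
    · simp [pvStepB, hm, pvRecSplit, hr]

-- ===== VERDICT (by name: the statement is the Claim_ definition above) =====
theorem split_translation_by_record_spec : Claim_equal_split_translation_by_record := by
  intro text standard _
  unfold Spec_split_translation_by_record
  unfold split_translation_by_record split_translation_by_record_alt
  simp only []
  set words : PySem.Set Char := PySem.Set.ofList standard.toList with hw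
  set ls := PySem.Chars.splitOn text.toList ['\n'] with hls
  obtain ⟨r0, rs, hr⟩ : ∃ r0 rs, pvRecSplit words ls = r0 :: rs := by
    cases h : pvRecSplit words ls with
    | nil => exact absurd h (pvRecSplit_ne_nil words ls)
    | cons a b => exact ⟨a, b, rfl⟩
  have hA : ls.foldl (pvStepA words) [[]] = pvRecSplit words ls := by
    have := pvFoldA words ls [] []
    simpa [hr] using this.trans (by simp [hr])
  rw [hA, pvFoldB words ls, hr]
  simp
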